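-- pv_equiv track=rewrite | github.com/Rm-agk/Python_Labs | funcs03.py | weird_case
-- ===== SOURCE A (Python) =====
-- def weird_case(some_str):
--     ret = ""
--     char_check = True
--     for char in some_str:
--         if char_check:
--             ret += char.upper()
--         else:
--             ret += char.lower()
--         if char != " ":
--             char_check = not char_check
--     return ret.strip()
-- ===== SOURCE B (Python) =====
-- def weird_case(some_str):
--     cased = [c.upper() if i % 2 == 0 else c.lower()
--              for i, c in enumerate(c for c in some_str if c != " ")]
--     it = iter(cased)
--     return "".join(" " if ch == " " else next(it) for ch in some_str).strip()
-- ===== Notes on version B (the rewrite author's own statement) =====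
-- stated objective: alternative
-- what changed: Replaces A's single stateful loop (a running case-flip flag updated per character) with a two-phase decomposition: first case only the non-space characters by their even/odd position via enumerate, then weave them back through the original string, emitting spaces verbatim.
import Mathlib
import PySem

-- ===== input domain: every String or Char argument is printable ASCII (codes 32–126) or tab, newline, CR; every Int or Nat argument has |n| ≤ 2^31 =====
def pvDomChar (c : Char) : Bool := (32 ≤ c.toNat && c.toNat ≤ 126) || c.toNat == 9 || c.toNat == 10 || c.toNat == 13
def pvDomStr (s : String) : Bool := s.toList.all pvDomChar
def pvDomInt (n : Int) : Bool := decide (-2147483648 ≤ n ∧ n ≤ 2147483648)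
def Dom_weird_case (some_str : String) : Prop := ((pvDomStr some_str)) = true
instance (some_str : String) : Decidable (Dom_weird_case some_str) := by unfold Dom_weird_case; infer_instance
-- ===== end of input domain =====

-- B alternates case by a two-phase decomposition (case the non-space chars first, then
-- weave them back between the spaces) instead of A's single stateful loop; objective: alternative.

-- ===== PORT A =====
-- the loop: ret grows by one cased char per step, char_check flips on non-space chars
def weird_case (some_str : String) : String :=
  String.ofList (PySem.Chars.strip
    (some_str.toList.foldl
      (fun (st : List Char × Bool) c =>
        (st.1 ++ [if st.2 then PySem.Chars.upperChar c else PySem.Chars.lowerChar c],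
         if c ≠ ' ' then !st.2 else st.2))
      ([], true)).1)

-- ===== PORT B =====
-- phase 2: scan the original, emitting spaces verbatim and the next cased char otherwise;
-- the exhausted-iterator branch is unreachable (cased has one entry per non-space char)
def pvWeave : List Char → List Char → List Char
  | [], _ => []
  | c :: rest, it =>
    if c = ' ' then ' ' :: pvWeave rest it
    else match it with
      | x :: it' => x :: pvWeave rest it'
      | [] => []

def weird_case_alt (some_str : String) : String :=
  String.ofList (PySem.Chars.strip (pvWeave some_str.toList
    ((PySem.List.enumerate (some_str.toList.filter (· != ' ')) 0).map
      (fun p => if PySem.Int.mod p.1 2 = 0 then PySem.Chars.upperChar p.2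
                else PySem.Chars.lowerChar p.2))))

-- ===== PRECONDITION & SPEC =====
def Spec_weird_case (some_str : String) (out : String) : Prop := out = weird_case_alt some_str
instance (some_str : String) (out : String) : Decidable (Spec_weird_case some_str out) := by unfold Spec_weird_case; infer_instance

-- ===== CLAIM (what is proved, stated in full; the proofs are below) =====
def Claim_equal_weird_case : Prop := ∀ (some_str : String), Dom_weird_case some_str → Spec_weird_case some_str (weird_case some_str)

-- ===== LEMMAS AND PROOFS =====

-- A's loop body, recursively: one cased char per input char, parity flipped on non-spaces
def pvARec : List Char → Bool → List Char
  | [], _ => []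
  | c :: t, b =>
    (if b then PySem.Chars.upperChar c else PySem.Chars.lowerChar c) ::
      pvARec t (if c ≠ ' ' then !b else b)

lemma pvA_foldl (l : List Char) (acc : List Char) (b : Bool) :
    (l.foldl
      (fun (st : List Char × Bool) c =>
        (st.1 ++ [if st.2 then PySem.Chars.upperChar c else PySem.Chars.lowerChar c],
         if c ≠ ' ' then !st.2 else st.2))
      (acc, b)).1 = acc ++ pvARec l b := by
  induction l generalizing acc b with
  | nil => simp [pvARec]
  | cons c t ih =>
    simp only [List.foldl_cons]
    rw [ih]
    simp [pvARec]

lemma pvB_weave (l : List Char) (n : Nat) :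
    pvWeave l ((PySem.List.enumerate (l.filter (· != ' ')) (n : Int)).map
      (fun p => if PySem.Int.mod p.1 2 = 0 then PySem.Chars.upperChar p.2
                else PySem.Chars.lowerChar p.2))
    = pvARec l (n % 2 == 0) := by
  induction l generalizing n with
  | nil => simp [pvWeave, pvARec]
  | cons c t ih =>
    by_cases hc : c = ' '
    · subst hc
      have hdrop : List.filter (· != ' ') (' ' :: t) = List.filter (· != ' ') t := by simp
      rw [hdrop]
      simp only [pvWeave, pvARec]
      rw [ih n]
      cases (n % 2 == 0) <;> rfl
    · have hfc : (c != ' ') = true := by simp [hc]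
      simp only [List.filter_cons, hfc, if_pos, PySem.List.enumerate_cons, List.map_cons,
        pvWeave, pvARec, hc]
      have hmod : PySem.Int.mod (n : Int) 2 = ((n % 2 : Nat) : Int) :=
        PySem.Int.mod_natCast n 2
      have hpar : (PySem.Int.mod (n : Int) 2 = 0) ↔ ((n % 2 == 0) = true) := by
        rw [hmod]; simp only [Nat.cast_eq_zero, beq_iff_eq]
      have ih' := ih (n + 1)
      have hflip : ((n + 1) % 2 == 0) = !(n % 2 == 0) := by
        rcases Nat.mod_two_eq_zero_or_one n with h | h <;> simp [Nat.add_mod, h]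
      rw [show ((n : Int) + 1) = ((n + 1 : Nat) : Int) by push_cast; ring] at *
      by_cases hp : (n % 2 == 0) = true
      · rw [if_pos (hpar.mpr hp), hp]
        simp only [hp] at hflip
        rw [ih', hflip]
        simp [hc]
      · rw [if_neg (fun h => hp (hpar.mp h))]
        simp only [Bool.not_eq_true] at hp
        rw [hp]
        simp only [hp] at hflip
        rw [ih', hflip]
        simp [hc]

-- ===== VERDICT (by name: the statement is the Claim_ definition above) =====
theorem weird_case_spec : Claim_equal_weird_case := by
  intro s _
  unfold Spec_weird_case weird_case weird_case_alt
  rw [pvA_foldl s.toList [] true, List.nil_append]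
  have h0 := pvB_weave s.toList 0
  simp only [Nat.cast_zero] at h0
  rw [h0]
  rfl
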